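-- pv_equiv track=rewrite | github.com/Alibabbba/Biostuff | DNa — kopia.py | Skew_max
-- ===== SOURCE A (Python) =====
-- def Skew(text):
--     skew = 0
--     Skew = []
--     Skew.append(skew)
--     for i in text:
--         if i == "G":
--             skew +=1
--             Skew.append(skew)
--         elif i == "C":
--             skew -= 1
--             Skew.append(skew)
--         else:
--             skew = skew
--             Skew.append(skew)
--     return Skew
--
-- def Skew_max(text):
--     skew = Skew(text)
--     _max = []
--     high = 0
--     for i in skew:
--         if i > high:
--             high = i
--     for j in range (len(skew)):
--         if skew[j] == high:
--             _max.append(j)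
--     return _max
-- ===== SOURCE B (Python) =====
-- def Skew_max(text):
--     skew = 0
--     best = 0
--     _max = [0]
--     for pos, ch in enumerate(text, 1):
--         if ch == "G":
--             skew += 1
--         elif ch == "C":
--             skew -= 1
--         if skew > best:
--             best = skew
--             _max = [pos]
--         elif skew == best:
--             _max.append(pos)
--     return _max
-- ===== Notes on version B (the rewrite author's own statement) =====
-- stated objective: simpler
-- what changed: Single pass tracking running skew, current best and index list in place, instead of materialising the full skew array and then scanning it twice (once for the max, once for the indices).
import Mathlib
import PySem

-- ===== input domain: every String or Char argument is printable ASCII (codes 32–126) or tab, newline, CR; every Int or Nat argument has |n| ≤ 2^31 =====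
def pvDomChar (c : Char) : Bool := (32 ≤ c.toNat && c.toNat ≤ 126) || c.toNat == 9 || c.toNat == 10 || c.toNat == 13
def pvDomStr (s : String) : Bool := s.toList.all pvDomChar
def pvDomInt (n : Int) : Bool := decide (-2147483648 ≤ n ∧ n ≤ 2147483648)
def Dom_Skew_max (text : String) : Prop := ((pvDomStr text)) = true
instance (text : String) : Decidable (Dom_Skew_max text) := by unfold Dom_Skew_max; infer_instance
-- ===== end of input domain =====

-- B replaces A's three passes (build the full skew array, scan for its max, scan again for
-- the indices) by a single pass keeping a running skew, the best value and the index list.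

-- ===== PORT A =====
-- helper Skew: builds [0] then appends the running skew after every character
def SkewArr (cs : List Char) : List Int :=
  (cs.foldl (fun (p : Int × List Int) c =>
      if c = 'G' then (p.1 + 1, p.2 ++ [p.1 + 1])
      else if c = 'C' then (p.1 - 1, p.2 ++ [p.1 - 1])
      else (p.1, p.2 ++ [p.1])) (0, [0])).2

def Skew_max (text : String) : List Int :=
  let skew := SkewArr text.toList
  let high := skew.foldl (fun h i => if i > h then i else h) 0
  (List.range skew.length).foldl
    (fun acc j => if skew.getD j 0 = high then acc ++ [(j : Int)] else acc) []

-- ===== PORT B =====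
-- the single loop of Source B: state (skew, best, _max), position counted from 1
def SkewMaxGo (cs : List Char) (pos : Int) (skew best : Int) (ms : List Int) : List Int :=
  match cs with
  | [] => ms
  | c :: rest =>
    let s' := if c = 'G' then skew + 1 else if c = 'C' then skew - 1 else skew
    if s' > best then SkewMaxGo rest (pos + 1) s' s' [pos]
    else if s' = best then SkewMaxGo rest (pos + 1) s' best (ms ++ [pos])
    else SkewMaxGo rest (pos + 1) s' best ms

def Skew_max_alt (text : String) : List Int :=
  SkewMaxGo text.toList 1 0 0 [0]

-- ===== PRECONDITION & SPEC =====
def Spec_Skew_max (text : String) (out : List Int) : Prop := out = Skew_max_alt text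
instance (text : String) (out : List Int) : Decidable (Spec_Skew_max text out) := by unfold Spec_Skew_max; infer_instance

-- ===== CLAIM (what is proved, stated in full; the proofs are below) =====
def Claim_equal_Skew_max : Prop := ∀ (text : String), Dom_Skew_max text → Spec_Skew_max text (Skew_max text)

-- ===== LEMMAS AND PROOFS =====

-- per-character skew step
def stepC (s : Int) (c : Char) : Int :=
  if c = 'G' then s + 1 else if c = 'C' then s - 1 else s

-- the tail of the skew array (values after each character), starting from skew s
def skewTail (s : Int) (cs : List Char) : List Int :=
  match cs with
  | [] => []
  | c :: rest => stepC s c :: skewTail (stepC s c) rest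

-- positions (counted from p) of the elements of l equal to h
def idxEq (l : List Int) (p : Int) (h : Int) : List Int :=
  match l with
  | [] => []
  | x :: rest => if x = h then p :: idxEq rest (p + 1) h else idxEq rest (p + 1) h

-- B's loop, abstracted over the list of future skew values
def collect (l : List Int) (p b : Int) (ms : List Int) : Int × List Int :=
  match l with
  | [] => (b, ms)
  | x :: rest =>
    if x > b then collect rest (p + 1) x [p]
    else if x = b then collect rest (p + 1) b (ms ++ [p])
    else collect rest (p + 1) b ms

lemma skewArr_eq (cs : List Char) : ∀ (s : Int) (acc : List Int),
    (cs.foldl (fun (p : Int × List Int) c =>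
      if c = 'G' then (p.1 + 1, p.2 ++ [p.1 + 1])
      else if c = 'C' then (p.1 - 1, p.2 ++ [p.1 - 1])
      else (p.1, p.2 ++ [p.1])) (s, acc)).2 = acc ++ skewTail s cs := by
  induction cs with
  | nil => intro s acc; simp [skewTail]
  | cons c rest ih =>
    intro s acc
    simp only [List.foldl_cons, skewTail]
    by_cases hg : c = 'G'
    · simp [hg, stepC, ih]
    · by_cases hc : c = 'C'
      · simp [hc, stepC, ih]
      · simp [hg, hc, stepC, ih]

lemma go_eq_collect (cs : List Char) : ∀ (p s b : Int) (ms : List Int),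
    SkewMaxGo cs p s b ms = (collect (skewTail s cs) p b ms).2 := by
  induction cs with
  | nil => intro p s b ms; simp [SkewMaxGo, skewTail, collect]
  | cons c rest ih =>
    intro p s b ms
    simp only [SkewMaxGo, skewTail, collect, stepC]
    split_ifs <;> simp_all

lemma high_eq_max (l : List Int) : ∀ (b : Int),
    l.foldl (fun h i => if i > h then i else h) b = l.foldl max b := by
  induction l with
  | nil => intro b; rfl
  | cons x rest ih =>
    intro b
    simp only [List.foldl_cons, ih]
    congr 1
    rw [max_comm]
    simp [max_def]
    split_ifs <;> omega

lemma le_foldl_max (l : List Int) : ∀ (b : Int), b ≤ l.foldl max b := by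
  induction l with
  | nil => intro b; simp
  | cons x rest ih =>
    intro b
    exact le_trans (le_max_left b x) (ih (max b x))

lemma collect_spec (l : List Int) : ∀ (p b : Int) (ms : List Int),
    collect l p b ms =
      (l.foldl max b,
       (if l.foldl max b = b then ms else []) ++ idxEq l p (l.foldl max b)) := by
  induction l with
  | nil => intro p b ms; simp [collect, idxEq]
  | cons x rest ih =>
    intro p b ms
    have hb := le_foldl_max rest
    simp only [collect, List.foldl_cons, idxEq]
    by_cases h1 : x > b
    · have hmax : max b x = x := max_eq_right (le_of_lt h1)
      rw [if_pos h1, ih]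
      simp only [hmax]
      have hne : rest.foldl max x ≠ b := by have := hb x; omega
      rw [if_neg hne]
      by_cases h2 : rest.foldl max x = x
      · simp [h2]
      · rw [if_neg h2, if_neg (fun h => h2 h.symm)]
    · have hmax : max b x = b := max_eq_left (by omega)
      rw [if_neg h1]
      simp only [hmax]
      by_cases h2 : x = b
      · rw [if_pos h2, ih]
        by_cases h3 : rest.foldl max b = b
        · simp [h3, h2, List.append_assoc]
        · rw [if_neg h3, if_neg h3, if_neg (by rw [h2]; exact fun h => h3 h.symm)]
      · rw [if_neg h2, ih]
        have hxm : ¬ x = rest.foldl max b := by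
          have := hb b
          by_cases h3 : rest.foldl max b = b <;> omega
        rw [if_neg hxm]

lemma range_collect (l : List Int) (h : Int) : ∀ (k : Nat) (acc : List Int),
    (List.range l.length).foldl
      (fun a j => if l.getD j 0 = h then a ++ [((k + j : Nat) : Int)] else a) acc
    = acc ++ idxEq l (k : Int) h := by
  induction l with
  | nil => intro k acc; simp [idxEq]
  | cons x rest ih =>
    intro k acc
    rw [List.length_cons, List.range_succ_eq_map, List.foldl_cons, List.foldl_map]
    have hfun : (fun (a : List Int) (j : Nat) =>
        if (x :: rest).getD (j + 1) 0 = h then a ++ [((k + (j + 1) : Nat) : Int)] else a)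
        = (fun a j => if rest.getD j 0 = h then a ++ [(((k + 1) + j : Nat) : Int)] else a) := by
      funext a j
      have : k + (j + 1) = (k + 1) + j := by omega
      simp [this]
    by_cases hx : x = h
    · simp only [Nat.succ_eq_add_one, List.getD_cons_zero, if_pos hx, Nat.add_zero]
      rw [hfun, ih (k + 1)]
      simp [idxEq, hx]
    · simp only [Nat.succ_eq_add_one, List.getD_cons_zero, if_neg hx, Nat.add_zero]
      rw [hfun, ih (k + 1)]
      simp [idxEq, hx]

lemma range_collect_zero (l : List Int) (h : Int) :
    (List.range l.length).foldl
      (fun a j => if l.getD j 0 = h then a ++ [(j : Int)] else a) []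
    = idxEq l 0 h := by
  have := range_collect l h 0 []
  simpa using this

-- ===== VERDICT (by name: the statement is the Claim_ definition above) =====
theorem Skew_max_spec : Claim_equal_Skew_max := by
  intro text _
  unfold Spec_Skew_max Skew_max Skew_max_alt SkewArr
  rw [skewArr_eq text.toList 0 [0], go_eq_collect, collect_spec]
  set t := skewTail 0 text.toList with ht
  simp only []
  have hM : ((0 : Int) :: t).foldl max 0 = t.foldl max 0 := by
    simp [List.foldl_cons]
  rw [high_eq_max, List.singleton_append, hM]
  set M := t.foldl max 0 with hMdef
  have hM0 : 0 ≤ M := le_foldl_max t 0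
  rw [range_collect_zero]
  simp only [idxEq]
  by_cases h : M = 0
  · rw [if_pos (by omega : (0:Int) = M), if_pos h]
    simp
  · rw [if_neg (by omega : ¬ (0:Int) = M), if_neg h]
    simp
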